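-- pv_equiv track=rewrite | github.com/InoriNatsume/ExifBased_namer | core/utils/tag_sets.py | compute_common_tags
-- ===== SOURCE A (Python) =====
-- from typing import Iterable
--
-- def compute_common_tags(tag_lists: Iterable[Iterable[str]]) -> list[str]:
--     lists = [list(tags) for tags in tag_lists]
--     if not lists:
--         return []
--
--     common_set = set(lists[0])
--     for tags in lists[1:]:
--         common_set.intersection_update(tags)
--
--     ordered: list[str] = []
--     seen: set[str] = set()
--     for tag in lists[0]:
--         if tag in common_set and tag not in seen:
--             ordered.append(tag)
--             seen.add(tag)
--     return ordered
-- ===== SOURCE B (Python) =====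
-- def compute_common_tags(tag_lists):
--     lists = [list(tags) for tags in tag_lists]
--     if not lists:
--         return []
--     n = len(lists)
--     count = {}
--     for tags in lists:
--         for t in set(tags):
--             count[t] = count.get(t, 0) + 1
--     ordered = []
--     emitted = set()
--     for t in lists[0]:
--         if count.get(t, 0) == n and t not in emitted:
--             ordered.append(t)
--             emitted.add(t)
--     return ordered
-- ===== Notes on version B (the rewrite author's own statement) =====
-- stated objective: alternative
-- what changed: Replaces the chain of set-intersection updates with a single frequency table counting in how many lists each tag occurs (tag is common iff its count equals the number of lists), then one ordered dedup pass over the first list.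
import Mathlib
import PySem

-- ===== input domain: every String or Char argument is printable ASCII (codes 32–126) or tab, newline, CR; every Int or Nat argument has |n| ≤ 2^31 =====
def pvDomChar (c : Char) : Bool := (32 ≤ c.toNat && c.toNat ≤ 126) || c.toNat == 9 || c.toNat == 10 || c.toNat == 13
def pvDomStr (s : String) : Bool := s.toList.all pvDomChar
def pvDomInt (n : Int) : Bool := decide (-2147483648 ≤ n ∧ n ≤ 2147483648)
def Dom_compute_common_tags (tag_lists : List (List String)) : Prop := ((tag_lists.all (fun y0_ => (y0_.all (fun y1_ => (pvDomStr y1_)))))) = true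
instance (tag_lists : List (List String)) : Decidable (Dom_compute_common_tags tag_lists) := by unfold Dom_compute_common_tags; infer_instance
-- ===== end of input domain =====

-- B replaces A's chain of set-intersection updates by one frequency table
-- (tag common iff its per-list count equals the number of lists); objective: alternative.

-- ===== PORT A =====
-- A: intersect sets left to right, then ordered dedup filter over lists[0].
def compute_common_tags (tag_lists : List (List String)) : List String :=
  match tag_lists with
  | [] => []
  | first :: rest =>
    let common : PySem.Set String :=
      rest.foldl (fun s tags => PySem.Set.inter s tags) (PySem.Set.ofList first)
    (first.foldl (fun (acc : List String × PySem.Set String) tag =>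
        if PySem.Set.contains common tag && !(PySem.Set.contains acc.2 tag) then
          (acc.1 ++ [tag], PySem.Set.add acc.2 tag)
        else acc)
      ([], PySem.Set.empty)).1

-- ===== PORT B =====
-- B: count, for each tag, in how many lists it occurs (deduping each list first),
-- then one ordered dedup pass over lists[0] keeping tags with count == len(lists).
def compute_common_tags_alt (tag_lists : List (List String)) : List String :=
  match tag_lists with
  | [] => []
  | first :: rest =>
    let n : Int := ((first :: rest).length : Int)
    let count : PySem.Dict String Int :=
      (first :: rest).foldl (fun d tags =>
          (PySem.Set.ofList tags).foldl (fun d t => d.insert t (d.getD t 0 + 1)) d)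
        PySem.Dict.empty
    (first.foldl (fun (acc : List String × PySem.Set String) t =>
        if (count.getD t 0 == n) && !(PySem.Set.contains acc.2 t) then
          (acc.1 ++ [t], PySem.Set.add acc.2 t)
        else acc)
      ([], PySem.Set.empty)).1

-- ===== PRECONDITION & SPEC =====
def Spec_compute_common_tags (tag_lists : List (List String)) (out : List String) : Prop := out = compute_common_tags_alt tag_lists
instance (tag_lists : List (List String)) (out : List String) : Decidable (Spec_compute_common_tags tag_lists out) := by unfold Spec_compute_common_tags; infer_instance

-- ===== CLAIM (what is proved, stated in full; the proofs are below) =====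
def Claim_equal_compute_common_tags : Prop := ∀ (tag_lists : List (List String)), Dom_compute_common_tags tag_lists → Spec_compute_common_tags tag_lists (compute_common_tags tag_lists)

-- ===== LEMMAS AND PROOFS =====

-- counting one deduped list bumps the count by 1 exactly for its members
theorem pv_count_one (tags : List String) (d : PySem.Dict String Int) (v : String) :
    ((PySem.Set.ofList tags).foldl (fun d t => d.insert t (d.getD t 0 + 1)) d).getD v 0
      = d.getD v 0 + (if v ∈ tags then 1 else 0) := by
  rw [PySem.Dict.getD_foldl_insert_add_one]
  by_cases h : v ∈ tags
  · rw [if_pos h, List.count_eq_one_of_mem (PySem.Set.nodup_ofList tags) ((PySem.Set.mem_ofList tags v).2 h)]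
    simp
  · rw [if_neg h, List.count_eq_zero_of_not_mem (fun hm => h ((PySem.Set.mem_ofList tags v).1 hm))]
    simp

-- the frequency table holds, for each tag, the number of lists containing it
theorem pv_count_all (ls : List (List String)) (d : PySem.Dict String Int) (v : String) :
    (ls.foldl (fun d tags =>
        (PySem.Set.ofList tags).foldl (fun d t => d.insert t (d.getD t 0 + 1)) d) d).getD v 0
      = d.getD v 0 + (ls.countP (fun l => decide (v ∈ l)) : Int) := by
  induction ls generalizing d with
  | nil => simp
  | cons tags rest ih =>
    rw [List.foldl_cons, ih, pv_count_one, List.countP_cons]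
    by_cases h : v ∈ tags
    · simp [h]; ring
    · simp [h]

-- membership in the chain of intersections
theorem pv_common_mem (rest : List (List String)) (s : PySem.Set String) (v : String) :
    (v ∈ rest.foldl (fun s tags => PySem.Set.inter s tags) s) ↔
      (v ∈ s ∧ ∀ l ∈ rest, v ∈ l) := by
  induction rest generalizing s with
  | nil => simp
  | cons tags rest ih =>
    rw [List.foldl_cons, ih]
    constructor
    · rintro ⟨hi, hall⟩
      rcases (PySem.Set.mem_inter s tags v).1 hi with ⟨hs, ht⟩
      refine ⟨hs, ?_⟩
      intro l hl
      rcases List.mem_cons.1 hl with rfl | hl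
      · exact ht
      · exact hall l hl
    · rintro ⟨hs, hall⟩
      refine ⟨(PySem.Set.mem_inter s tags v).2 ⟨hs, hall tags (List.mem_cons_self)⟩, ?_⟩
      intro l hl
      exact hall l (List.mem_cons_of_mem _ hl)

-- the ordered-dedup fold only looks at the predicate's value on members
theorem pv_fold_congr (first : List String) (p q : String → Bool)
    (acc : List String × PySem.Set String)
    (h : ∀ t ∈ first, p t = q t) :
    first.foldl (fun acc t =>
        if p t && !(PySem.Set.contains acc.2 t) then (acc.1 ++ [t], PySem.Set.add acc.2 t) else acc) acc
      = first.foldl (fun acc t =>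
        if q t && !(PySem.Set.contains acc.2 t) then (acc.1 ++ [t], PySem.Set.add acc.2 t) else acc) acc := by
  induction first generalizing acc with
  | nil => rfl
  | cons t ts ih =>
    simp only [List.foldl_cons]
    rw [h t (List.mem_cons_self)]
    exact ih _ (fun x hx => h x (List.mem_cons_of_mem _ hx))

-- ===== VERDICT (by name: the statement is the Claim_ definition above) =====
theorem compute_common_tags_spec : Claim_equal_compute_common_tags := by
  intro tag_lists _
  unfold Spec_compute_common_tags compute_common_tags compute_common_tags_alt
  match tag_lists with
  | [] => rfl
  | first :: rest =>
    simp only []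
    congr 1
    apply pv_fold_congr
    intro t ht
    rw [pv_count_all, PySem.Dict.getD_empty]
    have hmem : (t ∈ rest.foldl (fun s tags => PySem.Set.inter s tags) (PySem.Set.ofList first)) ↔
        (∀ l ∈ rest, t ∈ l) := by
      rw [pv_common_mem]
      exact ⟨fun h => h.2, fun h => ⟨(PySem.Set.mem_ofList first t).2 ht, h⟩⟩
    by_cases hall : ∀ l ∈ rest, t ∈ l
    · have h1 : PySem.Set.contains (rest.foldl (fun s tags => PySem.Set.inter s tags) (PySem.Set.ofList first)) t = true :=
        (PySem.Set.contains_iff _ _).2 (hmem.2 hall)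
      have h2 : (first :: rest).countP (fun l => decide (t ∈ l)) = (first :: rest).length :=
        List.countP_eq_length.2 (by
          intro l hl
          rcases List.mem_cons.1 hl with rfl | hl
          · exact decide_eq_true ht
          · exact decide_eq_true (hall l hl))
      rw [h1, h2]
      simp
    · have h1 : PySem.Set.contains (rest.foldl (fun s tags => PySem.Set.inter s tags) (PySem.Set.ofList first)) t = false := by
        rw [← Bool.not_eq_true]
        intro hc
        exact hall (hmem.1 ((PySem.Set.contains_iff _ _).1 hc))
      have h2 : (first :: rest).countP (fun l => decide (t ∈ l)) < (first :: rest).length := by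
        rcases Nat.lt_or_ge ((first :: rest).countP (fun l => decide (t ∈ l))) (first :: rest).length with h | h
        · exact h
        · exact absurd (fun l hl => by
            have := List.countP_eq_length.1 (Nat.le_antisymm List.countP_le_length h) l (List.mem_cons_of_mem _ hl)
            exact of_decide_eq_true this) hall
      rw [h1]
      symm
      rw [beq_eq_false_iff_ne]
      intro he
      simp only [List.length_cons] at h2 he
      omega
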